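-- pv_equiv track=rewrite | github.com/yyc776/RPBP | Codes/utils.py | update_scope
-- ===== SOURCE A (Python) =====
-- def update_scope(scope):
--     assert len(scope[0]) == 2
--     start_list = [i[0] for i in scope]
--     len_list = [i[1] for i in scope]
--     new_scope = []
--     for i in range(len(scope)):
--         if i == 0:
--             new_scope.append((start_list[i] + 1, len_list[i]))
--             # new_scope.append((start_list[i], len_list[i]))
--         else:
--             new_scope.append((new_scope[i - 1][0] + len_list[i - 1], len_list[i]))
--     return new_scope
-- ===== SOURCE B (Python) =====
-- def update_scope(scope):
--     assert len(scope[0]) == 2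
--     lengths = [item[1] for item in scope]
--     base = scope[0][0] + 1
--     return [(base + sum(lengths[:i]), lengths[i]) for i in range(len(lengths))]
-- ===== Notes on version B (the rewrite author's own statement) =====
-- stated objective: alternative
-- what changed: Replaced A's stateful loop that back-reads its own output list with a stateless per-index closed form: each start is computed independently as scope[0][0]+1 plus the sum of all preceding lengths (no accumulator, no reference to earlier output).
import Mathlib
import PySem

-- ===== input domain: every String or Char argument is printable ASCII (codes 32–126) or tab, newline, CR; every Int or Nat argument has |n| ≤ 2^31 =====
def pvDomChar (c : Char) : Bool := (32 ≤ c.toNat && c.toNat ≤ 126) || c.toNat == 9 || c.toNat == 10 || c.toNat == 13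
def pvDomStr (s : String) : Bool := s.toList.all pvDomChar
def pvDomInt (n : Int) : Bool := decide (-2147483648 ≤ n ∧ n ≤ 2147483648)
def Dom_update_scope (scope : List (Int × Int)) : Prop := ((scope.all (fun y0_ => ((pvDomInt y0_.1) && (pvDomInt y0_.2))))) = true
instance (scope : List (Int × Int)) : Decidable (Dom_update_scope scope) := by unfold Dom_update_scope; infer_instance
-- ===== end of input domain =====

-- B replaces A's stateful loop that back-reads its own output with a stateless per-index
-- closed form: each start is scope[0][0]+1 plus the sum of all preceding lengths (objective: alternative).

-- ===== PORT A =====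
def update_scope (scope : List (Int × Int)) : List (Int × Int) :=
  -- assert len(scope[0]) == 2 : always holds for pairs; scope[0] raising on [] is excluded by Pre_
  let start_list := scope.map (·.1)
  let len_list := scope.map (·.2)
  (PySem.List.pyRange 0 (scope.length : Int) 1).foldl
    (fun new_scope i =>
      if i == 0 then
        new_scope ++ [(PySem.List.pyGetD start_list i 0 + 1, PySem.List.pyGetD len_list i 0)]
      else
        new_scope ++ [((PySem.List.pyGetD new_scope (i - 1) (0, 0)).1
                        + PySem.List.pyGetD len_list (i - 1) 0,
                       PySem.List.pyGetD len_list i 0)]) []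

-- ===== PORT B =====
def update_scope_alt (scope : List (Int × Int)) : List (Int × Int) :=
  let lengths := scope.map (·.2)
  let base := (PySem.List.pyGetD scope 0 (0, 0)).1 + 1
  (PySem.List.pyRange 0 (lengths.length : Int) 1).map
    (fun i => (base + (PySem.List.slice lengths none (some i)).sum,
               PySem.List.pyGetD lengths i 0))

-- ===== PRECONDITION & SPEC =====
-- Pre_ excludes only the empty list, on which the Python A raises IndexError at scope[0].
def Pre_update_scope (scope : List (Int × Int)) : Prop := scope ≠ []
instance (scope : List (Int × Int)) : Decidable (Pre_update_scope scope) := by unfold Pre_update_scope; infer_instance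
def pvWitness_update_scope : (List (Int × Int)) := [(3, 5), (10, 2)]
def Spec_update_scope (scope : List (Int × Int)) (out : List (Int × Int)) : Prop := out = update_scope_alt scope
instance (scope : List (Int × Int)) (out : List (Int × Int)) : Decidable (Spec_update_scope scope out) := by unfold Spec_update_scope; infer_instance

-- ===== CLAIM (what is proved, stated in full; the proofs are below) =====
def Claim_equal_update_scope : Prop := ∀ (scope : List (Int × Int)), Dom_update_scope scope → Pre_update_scope scope → Spec_update_scope scope (update_scope scope)

-- ===== LEMMAS AND PROOFS =====

-- the common value of both ports: entries (s + sum of previous lengths, length)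
def pvMk (s : Int) : List Int → List (Int × Int)
  | [] => []
  | l :: ls => (s, l) :: pvMk (s + l) ls

theorem pvMk_length (s : Int) (lens : List Int) : (pvMk s lens).length = lens.length := by
  induction lens generalizing s with
  | nil => rfl
  | cons l ls ih => simp [pvMk, ih]

theorem pvMk_getElem (lens : List Int) (s : Int) (i : Nat) (h : i < lens.length) :
    (pvMk s lens)[i]'(by rw [pvMk_length]; exact h) = (s + (lens.take i).sum, lens[i]) := by
  induction lens generalizing s i with
  | nil => simp at h
  | cons l ls ih =>
    cases i with
    | zero => simp [pvMk]
    | succ j =>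
      have hj : j < ls.length := by simpa using h
      simp only [pvMk, List.getElem_cons_succ, List.take_succ_cons, List.sum_cons]
      rw [ih (s + l) j hj]
      simp [add_assoc]

theorem alt_eq_pvMk (p : Int × Int) (rest : List (Int × Int)) :
    update_scope_alt (p :: rest) = pvMk (p.1 + 1) ((p :: rest).map (·.2)) := by
  unfold update_scope_alt
  simp only [PySem.List.pyGetD_zero_cons]
  set lens := ((p : Int × Int) :: rest).map (·.2) with hlens
  rw [PySem.List.pyRange_zero_natCast, List.map_map]
  apply List.ext_getElem
  · simp [pvMk_length]
  · intro i h1 h2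
    have hi : i < lens.length := by simpa using h1
    rw [List.getElem_map, List.getElem_range]
    simp only [Function.comp_apply]
    rw [PySem.List.slice_to_natCast, PySem.List.pyGetD_natCast,
        pvMk_getElem lens (p.1 + 1) i hi,
        List.getD_eq_getElem?_getD, List.getElem?_eq_getElem hi]
    rfl

theorem A_fold (p : Int × Int) (rest : List (Int × Int)) (k : Nat)
    (hk : k ≤ (p :: rest).length) :
    (PySem.List.pyRange 0 (k : Int) 1).foldl
      (fun new_scope i =>
        if i == 0 then
          new_scope ++ [(PySem.List.pyGetD ((p :: rest).map (·.1)) i 0 + 1,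
                         PySem.List.pyGetD ((p :: rest).map (·.2)) i 0)]
        else
          new_scope ++ [((PySem.List.pyGetD new_scope (i - 1) (0, 0)).1
                          + PySem.List.pyGetD ((p :: rest).map (·.2)) (i - 1) 0,
                         PySem.List.pyGetD ((p :: rest).map (·.2)) i 0)]) []
      = (pvMk (p.1 + 1) ((p :: rest).map (·.2))).take k := by
  induction k with
  | zero => simp [PySem.List.pyRange_one_eq_nil]
  | succ k ih =>
    have hk' : k ≤ (p :: rest).length := by omega
    have hklt : k < (p :: rest).length := by omega
    rw [show ((k + 1 : Nat) : Int) = (k : Int) + 1 by push_cast; ring,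
        PySem.List.pyRange_one_succ_right (by positivity),
        List.foldl_append, ih hk']
    set lens := (p :: rest).map (·.2) with hlens
    have hlenlen : lens.length = (p :: rest).length := by simp [hlens]
    have hTlen : (pvMk (p.1 + 1) lens).length = lens.length := pvMk_length _ _
    simp only [List.foldl_cons, List.foldl_nil]
    by_cases h0 : k = 0
    · subst h0
      simp [pvMk, PySem.List.pyGetD_zero_cons, hlens]
    · have hne : ((k : Int) == 0) = false := by
        simp only [beq_eq_false_iff_ne]; exact_mod_cast h0
      rw [hne]
      simp only [Bool.false_eq_true, if_false]
      have hk1 : ((k : Int) - 1) = ((k - 1 : Nat) : Int) := by omega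
      have htake : ((pvMk (p.1 + 1) lens).take k).getD (k - 1) (0, 0)
          = (pvMk (p.1 + 1) lens)[k - 1]'(by omega) := by
        rw [List.getD_eq_getElem?_getD, List.getElem?_take_of_lt (by omega),
            List.getElem?_eq_getElem (by omega)]
        rfl
      rw [hk1]
      simp only [PySem.List.pyGetD_natCast]
      rw [htake, pvMk_getElem lens (p.1+1) (k-1) (by omega)]
      have hlk1 : lens.getD (k - 1) 0 = lens[k - 1]'(by omega) := by
        rw [List.getD_eq_getElem?_getD, List.getElem?_eq_getElem (by omega)]; rfl
      have hlk : lens.getD k 0 = lens[k]'(by omega) := by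
        rw [List.getD_eq_getElem?_getD, List.getElem?_eq_getElem (by omega)]; rfl
      rw [hlk1, hlk, List.take_add_one,
          List.getElem?_eq_getElem (by rw [pvMk_length]; omega)]
      have hsum : lens.take k = lens.take (k - 1) ++ [lens[k - 1]'(by omega)] := by
        conv_lhs => rw [show k = (k - 1) + 1 by omega]
        rw [List.take_add_one, List.getElem?_eq_getElem (by omega)]
        rfl
      simp only [pvMk_getElem lens (p.1+1) k (by omega), hsum, add_assoc]
      simp
      rw [List.sum_take_succ lens (k - 1) (by omega)]

-- ===== VERDICT (by name: the statement is the Claim_ definition above) =====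
theorem update_scope_spec : Claim_equal_update_scope := by
  intro scope _ hpre
  unfold Spec_update_scope
  cases scope with
  | nil => exact absurd rfl hpre
  | cons p rest =>
    unfold update_scope
    rw [A_fold p rest (p :: rest).length le_rfl, alt_eq_pvMk]
    rw [List.take_of_length_le (by rw [pvMk_length]; simp)]
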